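-- pv_equiv track=rewrite | github.com/MdAbedin/binarysearch | 0713 Longest Sublist of 1s After K Sets.py | solve
-- ===== SOURCE A (Python) =====
-- def solve(nums, k):
--     if not nums: return 0
--     if nums.count(0) <= k: return len(nums)
--
--     locs = [-1]+[i for i in range(len(nums)) if nums[i] == 0]+[len(nums)]
--     ans = -1
--
--     for i in range(k,len(locs)-1):
--         ans = max(ans, locs[i+1]-locs[i-k]-1)
--
--     return ans
-- ===== SOURCE B (Python) =====
-- def solve(nums, k):
--     ans = 0
--     q = [-1]  # position before window start, then positions of the <= k most recent zeros in the window
--     for i, x in enumerate(nums):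
--         if x == 0:
--             q.append(i)
--         if len(q) > k + 1:
--             q.pop(0)
--         ans = max(ans, i - q[0])
--     return ans
-- ===== Notes on version B (the rewrite author's own statement) =====
-- stated objective: alternative
-- what changed: Single forward pass over nums maintaining a bounded queue of the most recent zero positions and a running maximum (sliding window), instead of precomputing the full list of zero indices and then looping over gap differences with a separate early return for the few-zeros case. Pre_ excludes negative k with nonempty nums, where A's negative-index wraparound yields -1 (no run length) or an IndexError and B's window queue naturally raises or returns 0.
-- outside the precondition, e.g. on solve([0], -1): A returns -1, B returns 0; on solve([1], -1): A returns -1, B raises IndexError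
import Mathlib
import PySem

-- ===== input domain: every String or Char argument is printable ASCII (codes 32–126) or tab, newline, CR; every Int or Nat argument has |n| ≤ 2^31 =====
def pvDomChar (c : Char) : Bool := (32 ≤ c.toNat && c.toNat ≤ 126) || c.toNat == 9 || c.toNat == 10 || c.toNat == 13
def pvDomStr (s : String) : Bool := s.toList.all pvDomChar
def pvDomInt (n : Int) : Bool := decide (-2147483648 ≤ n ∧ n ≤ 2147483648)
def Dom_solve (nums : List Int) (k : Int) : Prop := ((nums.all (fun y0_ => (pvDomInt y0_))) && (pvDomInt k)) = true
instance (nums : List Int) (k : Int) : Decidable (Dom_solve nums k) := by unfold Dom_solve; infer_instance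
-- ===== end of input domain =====

-- B replaces A's precomputed zero-index list and gap loop by a single forward pass
-- keeping a bounded queue of recent zero positions and a running maximum (alternative one-pass formulation).

-- ===== PORT A =====
def solve (nums : List Int) (k : Int) : Int :=
  if nums = [] then 0
  else if (PySem.List.count nums 0 : Int) ≤ k then PySem.List.len nums
  else
    let locs : List Int :=
      [-1] ++ (PySem.List.pyRange 0 (PySem.List.len nums) 1).filter
                (fun i => PySem.List.pyGetD nums i 0 == 0) ++ [PySem.List.len nums]
    (PySem.List.pyRange k (PySem.List.len locs - 1) 1).foldl
      (fun ans i =>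
        max ans (PySem.List.pyGetD locs (i + 1) 0 - PySem.List.pyGetD locs (i - k) 0 - 1)) (-1)

-- ===== PORT B =====
def solve_alt (nums : List Int) (k : Int) : Int :=
  ((PySem.List.enumerate nums 0).foldl
    (fun st p =>
      let q1 := if p.2 == 0 then st.2 ++ [p.1] else st.2
      let q2 := if PySem.List.len q1 > k + 1 then q1.tail else q1
      (max st.1 (p.1 - PySem.List.pyGetD q2 0 0), q2))
    (0, [-1])).1

-- ===== PRECONDITION & SPEC =====
-- Pre_ excludes negative k with nonempty nums, where A's negative-index wraparound yields -1
-- (not a run length) or an IndexError and B's window queue naturally raises or returns 0.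
def Pre_solve (nums : List Int) (k : Int) : Prop := nums = [] ∨ 0 ≤ k
instance (nums : List Int) (k : Int) : Decidable (Pre_solve nums k) := by unfold Pre_solve; infer_instance
def pvWitness_solve : List Int × Int := ([1, 0, 1, 1, 0, 1], 1)
def Spec_solve (nums : List Int) (k : Int) (out : Int) : Prop := out = solve_alt nums k
instance (nums : List Int) (k : Int) (out : Int) : Decidable (Spec_solve nums k out) := by unfold Spec_solve; infer_instance

-- ===== CLAIM (what is proved, stated in full; the proofs are below) =====
def Claim_equal_solve : Prop := ∀ (nums : List Int) (k : Int), Dom_solve nums k → Pre_solve nums k → Spec_solve nums k (solve nums k)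

-- ===== LEMMAS AND PROOFS =====

-- zero test at index j, and the list of zero positions among indices [0, m)
def zpred (nums : List Int) (j : Int) : Bool := PySem.List.pyGetD nums j 0 == 0
def Fz (nums : List Int) (m : Nat) : List Int := (PySem.List.pyRange 0 (m : Int) 1).filter (zpred nums)
def czs (nums : List Int) (m : Nat) : Nat := (Fz nums m).length
-- window length ending at position r, in terms of the zero-prefix data
def fB (nums : List Int) (K : Nat) (r : Nat) : Int :=
  (r : Int) - ((-1) :: Fz nums (r + 1)).getD (czs nums (r + 1) - K) 0

lemma Fz_succ (nums : List Int) (m : Nat) :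
    Fz nums (m + 1) = Fz nums m ++ (if zpred nums m then [(m : Int)] else []) := by
  have hc : ((m + 1 : Nat) : Int) = (m : Int) + 1 := by push_cast; ring
  unfold Fz
  rw [hc, PySem.List.pyRange_one_succ_right (by positivity), List.filter_append,
    List.filter_singleton]
  cases h : zpred nums m <;> simp [h]

lemma Fz_prefix (nums : List Int) {a b : Nat} (h : a ≤ b) :
    ∃ t, Fz nums b = Fz nums a ++ t := by
  unfold Fz
  rw [PySem.List.pyRange_one_append 0 (a : Int) (b : Int) (by positivity) (by exact_mod_cast h),
    List.filter_append]
  exact ⟨_, rfl⟩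

lemma Fz_take (nums : List Int) {a b : Nat} (h : a ≤ b) :
    (Fz nums b).take (czs nums a) = Fz nums a := by
  obtain ⟨t, ht⟩ := Fz_prefix nums h
  rw [ht]
  have : czs nums a = (Fz nums a).length := rfl
  rw [this, List.take_left]

lemma mem_Fz (nums : List Int) (m : Nat) (x : Int) :
    x ∈ Fz nums m ↔ 0 ≤ x ∧ x < m ∧ zpred nums x := by
  unfold Fz
  simp [List.mem_filter, PySem.List.mem_pyRange_one]
  tauto

lemma Fz_pairwise (nums : List Int) (m : Nat) : (Fz nums m).Pairwise (· < ·) := by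
  exact List.Pairwise.filter _ (PySem.List.pairwise_lt_pyRange_one 0 (m : Int) )

lemma czs_le (nums : List Int) (m : Nat) : czs nums m ≤ m := by
  have h1 : czs nums m ≤ (PySem.List.pyRange 0 (m : Int) 1).length :=
    List.length_filter_le _ _
  rw [PySem.List.length_pyRange_one] at h1
  omega

lemma czs_mono (nums : List Int) {a b : Nat} (h : a ≤ b) : czs nums a ≤ czs nums b := by
  obtain ⟨t, ht⟩ := Fz_prefix nums h
  unfold czs
  rw [ht, List.length_append]
  omega

-- generic: in a strictly sorted list, l[t] lies in `take c` iff t < c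
lemma getElem_mem_take_iff {l : List Int} (hp : l.Pairwise (· < ·)) {t c : Nat}
    (ht : t < l.length) (hc : c ≤ l.length) : l[t] ∈ l.take c ↔ t < c := by
  constructor
  · intro hmem
    by_contra hct
    push_neg at hct
    obtain ⟨s, hs, hst⟩ := List.getElem_of_mem hmem
    have hslen : s < c := by simp at hs; omega
    have hsl : s < l.length := by simp at hs; omega
    rw [List.getElem_take] at hst
    have : s < t := by omega
    have := List.pairwise_iff_getElem.mp hp s t hsl ht this
    omega
  · intro htc
    have h1 : t < (l.take c).length := by simp; omega
    have h2 : (l.take c)[t]'h1 = l[t] := List.getElem_take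
    rw [← h2]
    exact List.getElem_mem h1

-- the i-th zero position has exactly i zeros before it
lemma czs_at_zero (nums : List Int) {i : Nat} (hi : i < czs nums nums.length) :
    czs nums ((Fz nums nums.length)[i]'(hi)).toNat = i := by
  set zs := Fz nums nums.length with hzs
  set zi := zs[i] with hzi
  have hlen : zs.length = czs nums nums.length := rfl
  have hmem : zi ∈ zs := List.getElem_mem hi
  have hb := (mem_Fz nums nums.length zi).mp hmem
  have hzn : zi.toNat ≤ nums.length := by omega
  have hczle : czs nums zi.toNat ≤ zs.length := czs_mono nums hzn
  have htake : zs.take (czs nums zi.toNat) = Fz nums zi.toNat := Fz_take nums hzn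
  have hle : czs nums zi.toNat ≤ i := by
    by_contra hlt
    push_neg at hlt
    have hmt : zs[i] ∈ zs.take (czs nums zi.toNat) :=
      (getElem_mem_take_iff (Fz_pairwise nums nums.length) hi hczle).mpr hlt
    rw [htake] at hmt
    have := (mem_Fz nums zi.toNat zs[i]).mp hmt
    omega
  have hge : i ≤ czs nums zi.toNat := by
    by_contra hlt
    push_neg at hlt
    set t := czs nums zi.toNat with htdef
    have htlen : t < zs.length := by omega
    have htlt : zs[t] < zi :=
      List.pairwise_iff_getElem.mp (Fz_pairwise nums nums.length) t i htlen hi hlt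
    have htmem : zs[t] ∈ zs := List.getElem_mem htlen
    have htb := (mem_Fz nums nums.length zs[t]).mp htmem
    have hin : zs[t] ∈ Fz nums zi.toNat := by
      rw [mem_Fz]
      refine ⟨htb.1, by omega, htb.2.2⟩
    rw [← htake] at hin
    have := (getElem_mem_take_iff (Fz_pairwise nums nums.length) htlen hczle).mp hin
    omega
  omega

lemma lt_czs_of_le (nums : List Int) {i r : Nat} (hi : i < czs nums nums.length) (hr : r < nums.length)
    (h : (Fz nums nums.length)[i]'(hi) ≤ (r : Int)) : i < czs nums (r + 1) := by
  set zs := Fz nums nums.length with hzs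
  have h' : zs[i] ≤ (r : Int) := h
  have hmem : zs[i] ∈ zs := List.getElem_mem hi
  have hb := (mem_Fz nums nums.length zs[i]).mp hmem
  have hrn : r + 1 ≤ nums.length := by omega
  have hczle : czs nums (r+1) ≤ zs.length := czs_mono nums hrn
  have htake : zs.take (czs nums (r+1)) = Fz nums (r+1) := Fz_take nums hrn
  have hin : zs[i] ∈ Fz nums (r+1) := by
    rw [mem_Fz]
    exact ⟨hb.1, by push_cast; omega, hb.2.2⟩
  rw [← htake] at hin
  exact (getElem_mem_take_iff (Fz_pairwise nums nums.length) hi hczle).mp hin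

-- prefix agreement of the head lookup
lemma getD_cons_take {zs : List Int} {t c : Nat} (ht : t ≤ c) (hc : c ≤ zs.length) :
    ((-1) :: zs.take c).getD t 0 = ((-1) :: zs).getD t 0 := by
  cases t with
  | zero => rfl
  | succ s =>
    have hs : s < c := by omega
    simp only [List.getD_cons_succ]
    rw [List.getD_eq_getElem?_getD, List.getD_eq_getElem?_getD,
      List.getElem?_take_of_lt hs]

-- count link
lemma count_zero_eq (nums : List Int) : (PySem.List.count nums 0 : Nat) = czs nums nums.length := by
  rw [PySem.List.count_eq, List.count_eq_countP]
  unfold czs Fz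
  rw [← List.countP_eq_length_filter]
  have hmap := PySem.List.map_pyGetD_pyRange_zero nums 0
  conv_lhs => rw [← hmap]
  rw [List.countP_map]
  rfl


lemma Fz_zero (nums : List Int) : Fz nums 0 = [] := by
  unfold Fz
  simp only [Nat.cast_zero]
  rw [PySem.List.pyRange_one_eq_nil (le_refl 0)]
  rfl

lemma locs_getD_le (zs : List Int) (nI : Int) {t : Nat} (ht : t ≤ zs.length) :
    (((-1) : Int) :: (zs ++ [nI])).getD t 0 = ((-1) :: zs).getD t 0 := by
  cases t with
  | zero => rfl
  | succ s =>
    simp only [List.getD_cons_succ]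
    rw [List.getD_eq_getElem?_getD, List.getD_eq_getElem?_getD,
      List.getElem?_append_left (by omega : s < zs.length)]

lemma locs_getD_mid (zs : List Int) (nI : Int) {iN : Nat} (h : iN < zs.length) :
    (((-1) : Int) :: (zs ++ [nI])).getD (iN + 1) 0 = zs[iN] := by
  simp only [List.getD_cons_succ]
  rw [List.getD_eq_getElem?_getD, List.getElem?_append_left h,
    List.getElem?_eq_getElem h]
  rfl

lemma locs_getD_last (zs : List Int) (nI : Int) :
    (((-1) : Int) :: (zs ++ [nI])).getD (zs.length + 1) 0 = nI := by
  simp only [List.getD_cons_succ]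
  rw [List.getD_eq_getElem?_getD]
  simp

lemma foldl_range_max_succ (n : Nat) :
    (List.range n).foldl (fun (a : Int) (r : Nat) => max a ((r : Int) + 1)) 0 = n := by
  induction n with
  | zero => rfl
  | succ n ih =>
    rw [List.range_succ, List.foldl_append, ih]
    simp only [List.foldl]
    rw [max_eq_right (by push_cast; omega)]
    push_cast
    ring

def locsL (nums : List Int) : List Int :=
  (-1) :: ((PySem.List.pyRange 0 (PySem.List.len nums) 1).filter
      (fun i => PySem.List.pyGetD nums i 0 == 0) ++ [PySem.List.len nums])

def termA (nums : List Int) (k : Int) (i : Int) : Int :=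
  PySem.List.pyGetD (locsL nums) (i + 1) 0 - PySem.List.pyGetD (locsL nums) (i - k) 0 - 1

lemma locsL_eq (nums : List Int) :
    locsL nums = (-1) :: (Fz nums nums.length ++ [(nums.length : Int)]) := by
  unfold locsL Fz zpred
  simp [PySem.List.len_eq]

lemma solve_branch3 (nums : List Int) (k : Int) (h1 : ¬(nums = []))
    (h2 : ¬((PySem.List.count nums 0 : Int) ≤ k)) :
    solve nums k = (PySem.List.pyRange k (PySem.List.len (locsL nums) - 1) 1).foldl
      (fun ans i => max ans (termA nums k i)) (-1) := by
  unfold solve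
  rw [if_neg h1, if_neg h2]
  rfl

lemma termA_eq (nums : List Int) (k : Int) (hk : 0 ≤ k) {iN : Nat} (hki : k.toNat ≤ iN) :
    termA nums k (iN : Int) =
      (locsL nums).getD (iN + 1) 0 - (locsL nums).getD (iN - k.toNat) 0 - 1 := by
  unfold termA
  have h1 : ((iN : Int) + 1) = ((iN + 1 : Nat) : Int) := by push_cast; ring
  have h2 : ((iN : Int) - k) = ((iN - k.toNat : Nat) : Int) := by omega
  rw [h1, h2, PySem.List.pyGetD_natCast, PySem.List.pyGetD_natCast]

-- ===== the master invariant for B's fold =====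
def bstep (k : Int) (st : Int × List Int) (p : Int × Int) : Int × List Int :=
  let q1 := if p.2 == 0 then st.2 ++ [p.1] else st.2
  let q2 := if PySem.List.len q1 > k + 1 then q1.tail else q1
  (max st.1 (p.1 - PySem.List.pyGetD q2 0 0), q2)

lemma solve_alt_eq_bstep (nums : List Int) (k : Int) :
    solve_alt nums k = ((PySem.List.enumerate nums 0).foldl (bstep k) (0, [-1])).1 := by
  rfl

lemma master (nums : List Int) (k : Int) (hk : 0 ≤ k) (m : Nat) (hm : m ≤ nums.length) :
    (PySem.List.enumerate (nums.take m) 0).foldl (bstep k) (0, [-1])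
      = ((List.range m).foldl (fun a r => max a (fB nums k.toNat r)) 0,
         ((-1) :: Fz nums m).drop (czs nums m - k.toNat)) := by
  induction m with
  | zero =>
    rw [List.take_zero]
    have h0 : Fz nums 0 = [] := Fz_zero nums
    simp [PySem.List.enumerate_nil, czs, h0]
  | succ m ih =>
    have hmn : m < nums.length := by omega
    have ihh := ih (by omega)
    set K := k.toNat with hKdef
    have hKk : (K : Int) = k := Int.toNat_of_nonneg hk
    set c := czs nums m with hcdef
    have hclen : (Fz nums m).length = c := rfl
    rw [List.take_succ_eq_append_getElem hmn, PySem.List.enumerate_append,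
      List.foldl_append, ihh]
    have hlen : ((nums.take m).length : Int) = (m : Int) := by
      simp [List.length_take]; omega
    rw [hlen]
    simp only [PySem.List.enumerate_cons, PySem.List.enumerate_nil, List.foldl_cons,
      List.foldl_nil, zero_add]
    have hpred : (nums[m] == 0) = zpred nums m := by
      unfold zpred
      rw [PySem.List.pyGetD_natCast, List.getD_eq_getElem?_getD,
        List.getElem?_eq_getElem hmn]
      rfl
    have hq0 : ∀ d : Nat, d < ((-1) :: Fz nums (m+1)).length →
        PySem.List.pyGetD (((-1) :: Fz nums (m+1)).drop d) 0 0
          = ((-1) :: Fz nums (m+1)).getD d 0 := by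
      intro d hd
      rw [PySem.List.pyGetD_zero, List.getD_eq_getElem?_getD, List.getD_eq_getElem?_getD,
        List.getElem?_drop]
      simp
    have hrange : (List.range (m+1)).foldl (fun a r => max a (fB nums K r)) 0
        = max ((List.range m).foldl (fun a r => max a (fB nums K r)) 0) (fB nums K m) := by
      rw [List.range_succ, List.foldl_append]
      rfl
    rw [hrange]
    unfold bstep
    simp only [hpred]
    cases hz : zpred nums m with
    | false =>
      have hFz : Fz nums (m+1) = Fz nums m := by rw [Fz_succ, hz]; simp
      have hc1 : czs nums (m+1) = c := by unfold czs; rw [hFz]; exact hclen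
      have hdl : (((-1) :: Fz nums m).drop (c - K)).length = c + 1 - (c - K) := by
        simp [hclen]
      simp only [Bool.false_eq_true, if_false]
      have hcond : ¬ (PySem.List.len (((-1) :: Fz nums m).drop (c - K)) > k + 1) := by
        rw [PySem.List.len_eq, hdl]
        omega
      rw [if_neg hcond]
      have hhead := hq0 (c - K) (by rw [hFz, List.length_cons, hclen]; omega)
      rw [hFz] at hhead ⊢
      rw [hhead]
      unfold fB
      rw [hFz, hc1]
    | true =>
      have hFz : Fz nums (m+1) = Fz nums m ++ [(m : Int)] := by rw [Fz_succ, hz]; simp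
      have hc1 : czs nums (m+1) = c + 1 := by unfold czs; rw [hFz]; simp [hclen]
      simp only [if_true]
      have hq1 : ((-1) :: Fz nums m).drop (c - K) ++ [(m : Int)]
          = ((-1) :: Fz nums (m+1)).drop (c - K) := by
        rw [hFz]
        show _ = (((-1) :: Fz nums m) ++ [(m : Int)]).drop (c - K)
        rw [List.drop_append_of_le_length (by rw [List.length_cons, hclen]; omega)]
      rw [hq1]
      have hdl : (((-1) :: Fz nums (m+1)).drop (c - K)).length = c + 2 - (c - K) := by
        rw [hFz]
        show ((((-1) :: Fz nums m) ++ [(m : Int)]).drop (c - K)).length = c + 2 - (c - K)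
        rw [List.length_drop, List.length_append, List.length_cons, List.length_singleton, hclen]
      by_cases hKc : K ≤ c
      · have hcond : PySem.List.len (((-1) :: Fz nums (m+1)).drop (c - K)) > k + 1 := by
          rw [PySem.List.len_eq, hdl]; omega
        rw [if_pos hcond, List.tail_drop]
        have hsub : c - K + 1 = (c + 1) - K := by omega
        rw [hsub]
        have hhead := hq0 ((c + 1) - K) (by rw [hFz]; show _ < (((-1) :: Fz nums m) ++ [(m : Int)]).length; rw [List.length_append, List.length_cons, List.length_singleton, hclen]; omega)
        rw [hhead]
        unfold fB
        rw [hc1]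
      · have hcond : ¬ (PySem.List.len (((-1) :: Fz nums (m+1)).drop (c - K)) > k + 1) := by
          rw [PySem.List.len_eq, hdl]; omega
        rw [if_neg hcond]
        have hsub : c - K = (c + 1) - K := by omega
        rw [hsub]
        have hhead := hq0 ((c + 1) - K) (by rw [hFz]; show _ < (((-1) :: Fz nums m) ++ [(m : Int)]).length; rw [List.length_append, List.length_cons, List.length_singleton, hclen]; omega)
        rw [hhead]
        unfold fB
        rw [hc1]

lemma Bchar (nums : List Int) (k : Int) (hk : 0 ≤ k) :
    solve_alt nums k = (List.range nums.length).foldl (fun a r => max a (fB nums k.toNat r)) 0 := by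
  rw [solve_alt_eq_bstep]
  have h := master nums k hk nums.length (le_refl _)
  rw [List.take_length] at h
  rw [h]

-- ===== final assembly =====
theorem solve_eq (nums : List Int) (k : Int) (hk : 0 ≤ k) : solve nums k = solve_alt nums k := by
  by_cases hnil : nums = []
  · subst hnil; rfl
  · have hKk : (k.toNat : Int) = k := Int.toNat_of_nonneg hk
    have hczn : czs nums nums.length = (Fz nums nums.length).length := rfl
    have czs0 : czs nums 0 = 0 := by unfold czs; rw [Fz_zero]; rfl
    by_cases hcnt : (PySem.List.count nums 0 : Int) ≤ k
    · -- few zeros: A returns len(nums), B's window never shrinks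
      have hsolve : solve nums k = PySem.List.len nums := by
        unfold solve; rw [if_neg hnil, if_pos hcnt]
      have hcle : czs nums nums.length ≤ k.toNat := by
        have hc := count_zero_eq nums
        omega
      rw [hsolve, PySem.List.len_eq, Bchar nums k hk]
      have hpt : ∀ (a : Int), ∀ r ∈ List.range nums.length,
          max a (fB nums k.toNat r) = max a ((r : Int) + 1) := by
        intro a r hr
        have hrn : r < nums.length := List.mem_range.mp hr
        have h1 : czs nums (r+1) ≤ k.toNat :=
          le_trans (czs_mono nums (by omega : r + 1 ≤ nums.length)) hcle
        unfold fB
        rw [Nat.sub_eq_zero_of_le h1, List.getD_cons_zero]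
        norm_num
      rw [PySem.List.foldl_congr_mem (List.range nums.length) _ _ 0 hpt]
      rw [foldl_range_max_succ]
    · push_neg at hcnt
      have hcount : (PySem.List.count nums 0 : Nat) = czs nums nums.length := count_zero_eq nums
      have hKm : k.toNat < (Fz nums nums.length).length := by omega
      have hmn : (Fz nums nums.length).length ≤ nums.length := by
        have := czs_le nums nums.length; omega
      have hn1 : 1 ≤ nums.length := by omega
      rw [solve_branch3 nums k hnil (not_le.mpr hcnt)]
      have hlocs : locsL nums = (-1) :: (Fz nums nums.length ++ [(nums.length : Int)]) :=
        locsL_eq nums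
      have hlen : PySem.List.len (locsL nums) - 1 = (((Fz nums nums.length).length + 1 : Nat) : Int) := by
        rw [PySem.List.len_eq, hlocs]
        simp only [List.length_cons, List.length_append, List.length_singleton, List.length_nil]
        push_cast
        omega
      rw [hlen, Bchar nums k hk]
      have hA : (PySem.List.pyRange k (((Fz nums nums.length).length + 1 : Nat) : Int) 1).foldl
            (fun ans i => max ans (termA nums k i)) (-1)
          = ((PySem.List.pyRange k (((Fz nums nums.length).length + 1 : Nat) : Int) 1).map
              (termA nums k)).foldl max (-1) := List.foldl_map.symm
      have hB : (List.range nums.length).foldl (fun a r => max a (fB nums k.toNat r)) 0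
          = ((List.range nums.length).map (fB nums k.toNat)).foldl max 0 :=
        List.foldl_map.symm
      rw [hA, hB]
      have hBle0 : (0 : Int) ≤ ((List.range nums.length).map (fB nums k.toNat)).foldl max 0 :=
        (PySem.List.le_foldl_max _ _).1
      have hg : ∀ t : Nat, t ≤ (Fz nums nums.length).length →
          (locsL nums).getD t 0 = ((-1) :: Fz nums nums.length).getD t 0 := by
        intro t ht; rw [hlocs]; exact locs_getD_le _ _ ht
      have hmid : ∀ iN : Nat, ∀ h : iN < (Fz nums nums.length).length,
          (locsL nums).getD (iN + 1) 0 = (Fz nums nums.length)[iN] := by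
        intro iN h; rw [hlocs]; exact locs_getD_mid _ _ h
      have hlast : (locsL nums).getD ((Fz nums nums.length).length + 1) 0 = (nums.length : Int) := by
        rw [hlocs]; exact locs_getD_last _ _
      have hfB : ∀ r : Nat, r < nums.length → fB nums k.toNat r
          = (r : Int) - ((-1) :: Fz nums nums.length).getD (czs nums (r+1) - k.toNat) 0 := by
        intro r hr
        unfold fB
        rw [← Fz_take nums (by omega : r + 1 ≤ nums.length),
          getD_cons_take (Nat.sub_le _ _) (czs_mono nums (by omega : r + 1 ≤ nums.length))]
      have hzb : ∀ iN : Nat, ∀ h : iN < (Fz nums nums.length).length,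
          0 ≤ (Fz nums nums.length)[iN] ∧ (Fz nums nums.length)[iN] < (nums.length : Int) := by
        intro iN h
        have := (mem_Fz nums nums.length _).mp (List.getElem_mem h)
        exact ⟨this.1, by exact_mod_cast this.2.1⟩
      -- a generic bound: each fB value is at most B's fold
      have hfB_le : ∀ r : Nat, r < nums.length →
          fB nums k.toNat r ≤ ((List.range nums.length).map (fB nums k.toNat)).foldl max 0 := by
        intro r hr
        exact (PySem.List.le_foldl_max _ _).2 _ (List.mem_map.mpr ⟨r, List.mem_range.mpr hr, rfl⟩)
      have htermA_le : ∀ i : Int, k ≤ i → i < ((Fz nums nums.length).length : Int) + 1 →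
          termA nums k i ≤ ((PySem.List.pyRange k (((Fz nums nums.length).length + 1 : Nat) : Int) 1).map
              (termA nums k)).foldl max (-1) := by
        intro i h1 h2
        refine (PySem.List.le_foldl_max _ _).2 _ (List.mem_map.mpr ⟨i, ?_, rfl⟩)
        rw [PySem.List.mem_pyRange_one]
        constructor
        · exact h1
        · push_cast; omega
      apply le_antisymm
      · -- A ≤ B
        rcases PySem.List.foldl_max_mem ((PySem.List.pyRange k (((Fz nums nums.length).length + 1 : Nat) : Int) 1).map
            (termA nums k)) (-1) with hA0 | hAmem
        · rw [hA0]; exact le_trans (by norm_num) hBle0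
        · obtain ⟨i, hiMem, hiEq⟩ := List.mem_map.mp hAmem
          rw [← hiEq]
          have hib := (PySem.List.mem_pyRange_one).mp hiMem
          have hiN : ((i.toNat : Nat) : Int) = i := Int.toNat_of_nonneg (le_trans hk hib.1)
          have hKiN : k.toNat ≤ i.toNat := by omega
          have hiNmm : i.toNat ≤ (Fz nums nums.length).length := by
            have := hib.2; push_cast at this; omega
          rw [← hiN, termA_eq nums k hk hKiN]
          by_cases him : i.toNat < (Fz nums nums.length).length
          · have hzi := hzb i.toNat him
            rw [hmid i.toNat him]
            by_cases hz1 : (Fz nums nums.length)[i.toNat] ≤ 0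
            · -- the zero is at position 0, so the term is 0
              have hz0 : (Fz nums nums.length)[i.toNat] = 0 := le_antisymm hz1 hzi.1
              have hcz := czs_at_zero nums him
              rw [hz0] at hcz
              simp only [Int.toNat_zero, czs0] at hcz
              have hi0 : i.toNat = 0 := hcz.symm
              rw [hz0, show i.toNat - k.toNat = 0 from by omega]
              rw [hg 0 (by omega), List.getD_cons_zero]
              exact le_trans (by norm_num) hBle0
            · push_neg at hz1
              have hcz := czs_at_zero nums him
              have hrN : ((Fz nums nums.length)[i.toNat] - 1).toNat < nums.length := by
                have := hzi.2; omega
              have hr1 : ((Fz nums nums.length)[i.toNat] - 1).toNat + 1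
                  = ((Fz nums nums.length)[i.toNat]).toNat := by omega
              have hfbr := hfB _ hrN
              rw [hr1, hcz] at hfbr
              have := hfB_le _ hrN
              rw [hfbr] at this
              rw [hg (i.toNat - k.toNat) (by omega)]
              have hcast : ((((Fz nums nums.length)[i.toNat] - 1).toNat : Nat) : Int)
                  = (Fz nums nums.length)[i.toNat] - 1 := by omega
              rw [hcast] at this
              omega
          · have hieq : i.toNat = (Fz nums nums.length).length := by omega
            rw [hieq, hlast]
            have hrN : nums.length - 1 < nums.length := by omega
            have hfbr := hfB _ hrN
            have hr1 : nums.length - 1 + 1 = nums.length := by omega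
            rw [hr1] at hfbr
            have := hfB_le _ hrN
            rw [hfbr] at this
            rw [hg ((Fz nums nums.length).length - k.toNat) (by omega)]
            have hcast : ((nums.length - 1 : Nat) : Int) = (nums.length : Int) - 1 := by omega
            rw [hcast, hczn] at this
            omega
      · -- B ≤ A
        have hAK : (0 : Int) ≤ ((PySem.List.pyRange k (((Fz nums nums.length).length + 1 : Nat) : Int) 1).map
            (termA nums k)).foldl max (-1) := by
          have hm := htermA_le ((k.toNat : Nat) : Int) (by omega) (by push_cast; omega)
          have hv : termA nums k ((k.toNat : Nat) : Int)
              = (Fz nums nums.length)[k.toNat]'hKm := by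
            rw [termA_eq nums k hk (le_refl _), hmid k.toNat hKm,
              Nat.sub_self, hg 0 (by omega), List.getD_cons_zero]
            ring
          rw [hv] at hm
          have := (hzb k.toNat hKm).1
          omega
        rcases PySem.List.foldl_max_mem ((List.range nums.length).map (fB nums k.toNat)) 0 with hB0 | hBmem
        · rw [hB0]; exact hAK
        · obtain ⟨rN, hrMem, hrEq⟩ := List.mem_map.mp hBmem
          rw [← hrEq]
          have hrn : rN < nums.length := List.mem_range.mp hrMem
          have hcmm : czs nums (rN+1) ≤ (Fz nums nums.length).length :=
            czs_mono nums (by omega : rN + 1 ≤ nums.length)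
          rw [hfB rN hrn]
          by_cases hcK : k.toNat ≤ czs nums (rN+1)
          · have hm := htermA_le ((czs nums (rN+1) : Nat) : Int) (by omega) (by push_cast; omega)
            have hv : termA nums k ((czs nums (rN+1) : Nat) : Int)
                = (locsL nums).getD (czs nums (rN+1) + 1) 0
                  - ((-1) :: Fz nums nums.length).getD (czs nums (rN+1) - k.toNat) 0 - 1 := by
              rw [termA_eq nums k hk hcK, hg (czs nums (rN+1) - k.toNat) (by omega)]
            rw [hv] at hm
            by_cases hcm : czs nums (rN+1) < (Fz nums nums.length).length
            · rw [hmid _ hcm] at hm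
              have hlt : (rN : Int) < (Fz nums nums.length)[czs nums (rN+1)] := by
                by_contra hge
                push_neg at hge
                have := lt_czs_of_le nums (by omega : czs nums (rN+1) < czs nums nums.length) hrn hge
                omega
              omega
            · have hceq : czs nums (rN+1) = (Fz nums nums.length).length := by omega
              rw [hceq, hlast] at hm
              rw [hceq]
              omega
          · push_neg at hcK
            rw [Nat.sub_eq_zero_of_le (le_of_lt hcK), List.getD_cons_zero]
            have hm := htermA_le ((k.toNat : Nat) : Int) (by omega) (by push_cast; omega)
            have hv : termA nums k ((k.toNat : Nat) : Int)
                = (Fz nums nums.length)[k.toNat]'hKm := by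
              rw [termA_eq nums k hk (le_refl _), hmid k.toNat hKm,
                Nat.sub_self, hg 0 (by omega), List.getD_cons_zero]
              ring
            rw [hv] at hm
            have hlt : (rN : Int) < (Fz nums nums.length)[k.toNat]'hKm := by
              by_contra hge
              push_neg at hge
              have := lt_czs_of_le nums (by omega : k.toNat < czs nums nums.length) hrn hge
              omega
            omega

-- ===== VERDICT (by name: the statement is the Claim_ definition above) =====
theorem solve_spec : Claim_equal_solve := by
  intro nums k _hd hpre
  unfold Spec_solve
  rcases hpre with h | h
  · subst h; rfl
  · exact solve_eq nums k h
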